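-- pv_equiv track=rewrite | github.com/roholazandie/mastermind | self_play_manhattan.py | minimax_pick
-- ===== SOURCE A (Python) =====
-- def score_guess(guess, code):
--     """
--     Returns the Manhattan (taxicab) distance between the guess and code.
--     guess and code are tuples/lists of the same length.
--     """
--     return sum(abs(g - c) for g, c in zip(guess, code))
--
-- def code_to_int(code, num_colors=6):
--     """
--     Convert a code tuple into an integer for tie-breaking.
--     """
--     val = 0
--     for digit in code:
--         val = val * num_colors + (digit - 1)
--     return val
--
-- def minimax_pick(S, all_guesses):
--     """
--     Minimax strategy for Manhattan distance feedback.
--     """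
--     best_guesses = []
--     best_worst_case = None
--
--     for guess in all_guesses:
--         partition = {}
--         for code in S:
--             distance = score_guess(guess, code)
--             partition[distance] = partition.get(distance, 0) + 1
--
--         wc_size = max(partition.values(), default=0)
--
--         if best_worst_case is None or wc_size < best_worst_case:
--             best_worst_case = wc_size
--             best_guesses = [guess]
--         elif wc_size == best_worst_case:
--             best_guesses.append(guess)
--
--     # Prefer guesses in S and break ties numerically
--     in_S = [g for g in best_guesses if g in S]
--     final_candidates = in_S if in_S else best_guesses
--     final_candidates.sort(key=lambda c: code_to_int(c))
--     return final_candidates[0]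
-- ===== SOURCE B (Python) =====
-- def minimax_pick(S, all_guesses):
--     """Single-pass argmin over a composite key (worst-case partition size,
--     not-in-S flag, numeric code value); no tie list, no filter, no sort."""
--     best_key = None
--     best_guess = None
--     for guess in all_guesses:
--         ds = [sum(abs(a - b) for a, b in zip(guess, code)) for code in S]
--         wc = max(map(ds.count, ds), default=0)
--         val = 0
--         for d in guess:
--             val = val * 6 + (d - 1)
--         key = (wc, 0 if guess in S else 1, val)
--         if best_key is None or key < best_key:
--             best_key = key
--             best_guess = guess
--     return best_guess
-- ===== Notes on version B (the rewrite author's own statement) =====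
-- stated objective: simpler
-- what changed: A's incremental best-worst-case tracking with a tie list, then in_S filtering and a sort for tie-breaking, is replaced by a single pass that selects the argmin of a composite key (worst-case partition size, not-in-S flag, numeric code value); B also drops the distance dict, taking the max multiplicity directly from the distance list.
-- outside the precondition, e.g. on minimax_pick([(1, 2)], []): A raises IndexError, B returns None
import Mathlib
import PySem

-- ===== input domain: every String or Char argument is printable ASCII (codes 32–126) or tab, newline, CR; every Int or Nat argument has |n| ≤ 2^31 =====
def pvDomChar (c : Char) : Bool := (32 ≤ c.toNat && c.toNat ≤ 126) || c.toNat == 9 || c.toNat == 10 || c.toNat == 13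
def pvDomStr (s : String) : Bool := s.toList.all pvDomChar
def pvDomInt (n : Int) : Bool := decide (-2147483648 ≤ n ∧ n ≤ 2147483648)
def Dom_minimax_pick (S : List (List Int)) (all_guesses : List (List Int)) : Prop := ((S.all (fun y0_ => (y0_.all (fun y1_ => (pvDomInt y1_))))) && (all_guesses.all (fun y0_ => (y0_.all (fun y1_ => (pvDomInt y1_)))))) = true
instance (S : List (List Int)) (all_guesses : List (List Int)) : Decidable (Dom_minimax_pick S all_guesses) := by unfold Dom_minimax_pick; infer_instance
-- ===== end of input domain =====

-- B replaces A's tie-list + in_S filter + sort selection by a single-pass argmin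
-- over the composite key (worst-case size, not-in-S flag, numeric code value): simpler decomposition.

-- B replaces A's tie-list + in_S filter + sort selection by a single-pass argmin
-- over a composite key (worst-case size, not-in-S flag, numeric code value): simpler decomposition.

-- ===== PORT A =====
def score_guess (guess code : List Int) : Int :=
  ((guess.zip code).map (fun p => |p.1 - p.2|)).sum

def code_to_int (code : List Int) (num_colors : Int) : Int :=
  code.foldl (fun val digit => val * num_colors + (digit - 1)) 0

def minimax_pick (S : List (List Int)) (all_guesses : List (List Int)) : List Int :=
  let st := all_guesses.foldl (fun st guess =>
    let partition := S.foldl (fun d code =>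
        let distance := score_guess guess code
        d.insert distance (d.getD distance 0 + 1)) PySem.Dict.empty
    let wc_size := (PySem.List.max? partition.values (fun v => v)).getD 0
    match st.2 with
    | none => ([guess], some wc_size)
    | some b => if wc_size < b then ([guess], some wc_size)
                else if wc_size = b then (st.1 ++ [guess], some b)
                else st) (([] : List (List Int)), (none : Option Int))
  let in_S := st.1.filter (fun g => S.contains g)
  let final_candidates := if in_S.isEmpty then st.1 else in_S
  -- Python 'final_candidates[0]' raises IndexError only when all_guesses = []; excluded by Pre_
  (PySem.List.sorted final_candidates (fun c => code_to_int c 6)).headD []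

-- ===== PORT B =====
-- Python tuple '<' on the (wc, flag, val) triple of ints (lexicographic)
def pyLtKey (a b : Int × Int × Int) : Bool :=
  a.1 < b.1 || (a.1 == b.1 && (a.2.1 < b.2.1 || (a.2.1 == b.2.1 && a.2.2 < b.2.2)))

def minimax_pick_alt (S : List (List Int)) (all_guesses : List (List Int)) : List Int :=
  let res := all_guesses.foldl (fun best guess =>
    let ds := S.map (fun code => ((guess.zip code).map (fun p => |p.1 - p.2|)).sum)
    let wc := (PySem.List.max? (ds.map (fun d => (PySem.List.count ds d : Int))) (fun v => v)).getD 0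
    let val := guess.foldl (fun v d => v * 6 + (d - 1)) 0
    let key := (wc, if S.contains guess then (0 : Int) else 1, val)
    match best with
    | none => some (key, guess)
    | some (bk, bg) => if pyLtKey key bk then some (key, guess) else some (bk, bg))
    (none : Option ((Int × Int × Int) × List Int))
  match res with
  | some (_, g) => g
  | none => []   -- Python returns None here (only for all_guesses = []); excluded by Pre_

-- ===== PRECONDITION & SPEC =====
-- Pre_ excludes only all_guesses = [], where A raises IndexError (B's Python returns None there).
def Pre_minimax_pick (S : List (List Int)) (all_guesses : List (List Int)) : Prop :=
  all_guesses ≠ []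
instance (S : List (List Int)) (all_guesses : List (List Int)) : Decidable (Pre_minimax_pick S all_guesses) := by unfold Pre_minimax_pick; infer_instance

def pvWitness_minimax_pick : List (List Int) × List (List Int) :=
  ([[1, 2]], [[1, 2], [2, 1]])

def Spec_minimax_pick (S : List (List Int)) (all_guesses : List (List Int)) (out : List Int) : Prop := out = minimax_pick_alt S all_guesses
instance (S : List (List Int)) (all_guesses : List (List Int)) (out : List Int) : Decidable (Spec_minimax_pick S all_guesses out) := by unfold Spec_minimax_pick; infer_instance

-- ===== CLAIM (what is proved, stated in full; the proofs are below) =====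
def Claim_equal_minimax_pick : Prop := ∀ (S : List (List Int)) (all_guesses : List (List Int)), Dom_minimax_pick S all_guesses → Pre_minimax_pick S all_guesses → Spec_minimax_pick S all_guesses (minimax_pick S all_guesses)

-- ===== LEMMAS AND PROOFS =====

def wcF (S : List (List Int)) (guess : List Int) : Int :=
  let ds := S.map (fun code => ((guess.zip code).map (fun p => |p.1 - p.2|)).sum)
  (PySem.List.max? (ds.map (fun d => (PySem.List.count ds d : Int))) (fun v => v)).getD 0

theorem max?_id_congr_mem (l l' : List Int) (h : ∀ v, v ∈ l ↔ v ∈ l') :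
    PySem.List.max? l (fun v => v) = PySem.List.max? l' (fun v => v) := by
  cases hl : PySem.List.max? l (fun v => v) with
  | none =>
      rw [PySem.List.max?_eq_none_iff] at hl
      cases hl' : PySem.List.max? l' (fun v => v) with
      | none => rfl
      | some m' =>
          have := PySem.List.max?_mem hl'
          rw [← h] at this; subst hl; simp at this
  | some m =>
      cases hl' : PySem.List.max? l' (fun v => v) with
      | none =>
          rw [PySem.List.max?_eq_none_iff] at hl'
          have := PySem.List.max?_mem hl
          rw [h] at this; subst hl'; simp at this
      | some m' =>
          have h1 := PySem.List.max?_isMax hl m' ((h m').mpr (PySem.List.max?_mem hl'))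
          have h2 := PySem.List.max?_isMax hl' m ((h m).mp (PySem.List.max?_mem hl))
          exact congrArg some (le_antisymm h2 h1)

theorem wcA_eq (S : List (List Int)) (g : List Int) :
    (PySem.List.max? (S.foldl (fun d code =>
        let distance := score_guess g code
        d.insert distance (d.getD distance 0 + 1)) PySem.Dict.empty).values (fun v => v)).getD 0
    = wcF S g := by
  have h1 : (S.foldl (fun d code =>
        let distance := score_guess g code
        d.insert distance (d.getD distance 0 + 1)) PySem.Dict.empty)
      = PySem.Dict.counter (S.map (fun code => score_guess g code)) := by
    rw [← PySem.Dict.foldl_insert_getD_add_one_eq_counter, List.foldl_map]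
  rw [h1]
  unfold wcF
  have hsg : (S.map (fun code => ((g.zip code).map (fun p => |p.1 - p.2|)).sum))
      = S.map (fun code => score_guess g code) := rfl
  rw [hsg]
  congr 1
  apply max?_id_congr_mem
  intro v
  set ds := S.map (fun code => score_guess g code) with hds
  have hv : (PySem.Dict.counter ds).values = (PySem.Set.ofList ds).map (fun k => (List.count k ds : Int)) := by
    rw [PySem.Dict.values, PySem.Dict.items_counter]
    simp [List.map_map]
  rw [hv]
  simp only [List.mem_map, PySem.List.count]
  constructor
  · rintro ⟨k, hk, rfl⟩
    exact ⟨k, (PySem.Set.mem_ofList ds k).mp hk, rfl⟩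
  · rintro ⟨k, hk, rfl⟩
    exact ⟨k, (PySem.Set.mem_ofList ds k).mpr hk, rfl⟩

-- A's loop with the common worst-case function
def stepW (S : List (List Int)) (st : List (List Int) × Option Int) (guess : List Int) :
    List (List Int) × Option Int :=
  match st.2 with
  | none => ([guess], some (wcF S guess))
  | some b => if wcF S guess < b then ([guess], some (wcF S guess))
              else if wcF S guess = b then (st.1 ++ [guess], some b)
              else st

theorem stepA_eq_stepW (S : List (List Int)) :
    (fun (st : List (List Int) × Option Int) guess =>
      let partition := S.foldl (fun d code =>
          let distance := score_guess guess code
          d.insert distance (d.getD distance 0 + 1)) PySem.Dict.empty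
      let wc_size := (PySem.List.max? partition.values (fun v => v)).getD 0
      match st.2 with
      | none => ([guess], some wc_size)
      | some b => if wc_size < b then ([guess], some wc_size)
                  else if wc_size = b then (st.1 ++ [guess], some b)
                  else st) = stepW S := by
  funext st guess
  dsimp only
  rw [wcA_eq S guess]
  rfl

theorem minimax_pick_eq (S : List (List Int)) (gs : List (List Int)) :
    minimax_pick S gs =
      (let st := gs.foldl (stepW S) ([], none)
       let in_S := st.1.filter (fun g => S.contains g)
       let final_candidates := if in_S.isEmpty then st.1 else in_S
       (PySem.List.sorted final_candidates (fun c => code_to_int c 6)).headD []) := by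
  unfold minimax_pick
  rw [stepA_eq_stepW S]

theorem loopW (S : List (List Int)) (gs : List (List Int)) (h : gs ≠ []) :
    ∃ m : Int,
      gs.foldl (stepW S) ([], none) = (gs.filter (fun g => decide (wcF S g = m)), some m)
      ∧ (∀ g ∈ gs, m ≤ wcF S g) ∧ ∃ g ∈ gs, wcF S g = m := by
  induction gs using List.reverseRecOn with
  | nil => exact absurd rfl h
  | append_singleton t x ih =>
      cases ht : t with
      | nil =>
          refine ⟨wcF S x, ?_, ?_, x, by simp, rfl⟩
          · simp [stepW]
          · intro g hg; simp at hg; subst hg; exact le_refl _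
      | cons a t' =>
          rw [← ht]
          have htne : t ≠ [] := by rw [ht]; simp
          obtain ⟨m, hfold, hmin, g0, hg0, hg0m⟩ := ih htne
          rw [List.foldl_append, hfold]
          by_cases h1 : wcF S x < m
          · refine ⟨wcF S x, ?_, ?_, x, by simp, rfl⟩
            · show stepW S (_, some m) x = _
              rw [stepW]
              simp only [if_pos h1]
              rw [List.filter_append]
              have : t.filter (fun g => decide (wcF S g = wcF S x)) = [] := by
                rw [List.filter_eq_nil_iff]
                intro a ha
                have := hmin a ha
                simp; omega
              simp [this]
            · intro g hg
              rcases List.mem_append.1 hg with hg | hg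
              · have := hmin g hg; omega
              · simp at hg; subst hg; exact le_refl _
          · by_cases h2 : wcF S x = m
            · refine ⟨m, ?_, ?_, g0, by simp [List.mem_append.2 (Or.inl hg0)], hg0m⟩
              · show stepW S (_, some m) x = _
                rw [stepW]
                simp only [if_neg h1, if_pos h2]
                rw [List.filter_append]
                simp [h2]
              · intro g hg
                rcases List.mem_append.1 hg with hg | hg
                · exact hmin g hg
                · simp at hg; subst hg; omega
            · refine ⟨m, ?_, ?_, g0, by simp [List.mem_append.2 (Or.inl hg0)], hg0m⟩
              · show stepW S (_, some m) x = _
                rw [stepW]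
                simp only [if_neg h1, if_neg h2]
                rw [List.filter_append]
                have : [x].filter (fun g => decide (wcF S g = m)) = [] := by simp [h2]
                simp [this]
              · intro g hg
                rcases List.mem_append.1 hg with hg | hg
                · exact hmin g hg
                · simp at hg; subst hg; omega

def flagF (S : List (List Int)) (g : List Int) : Int := if S.contains g then 0 else 1

def keyF (S : List (List Int)) (g : List Int) : Int × Int × Int :=
  (wcF S g, flagF S g, code_to_int g 6)

def champ (lt : List Int → List Int → Bool) (l : List (List Int)) : Option (List Int) :=
  l.foldl (fun acc x => match acc with
    | none => some x
    | some m => if lt x m then some x else some m) none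

theorem flagF_of_contains (S : List (List Int)) (g : List Int) (h : S.contains g = true) :
    flagF S g = 0 := by unfold flagF; rw [h]; rfl

theorem flagF_of_not_contains (S : List (List Int)) (g : List Int) (h : S.contains g = false) :
    flagF S g = 1 := by unfold flagF; rw [h]; rfl

def ltK (S : List (List Int)) (x m : List Int) : Bool := pyLtKey (keyF S x) (keyF S m)
def ltC (x m : List Int) : Bool := decide (code_to_int x 6 < code_to_int m 6)

theorem ltC_trans_not (a b c : List Int) (h1 : ltC a b = true) (h2 : ltC c b = false) :
    ltC a c = true := by simp [ltC] at *; omega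
theorem ltC_asym (a b : List Int) (h1 : ltC a b = true) : ltC b a = false := by
  simp [ltC] at *; omega

theorem ltK_true_iff (S : List (List Int)) (y r : List Int) :
    ltK S y r = true ↔ (wcF S y < wcF S r ∨ (wcF S y = wcF S r ∧
      (flagF S y < flagF S r ∨ (flagF S y = flagF S r ∧ code_to_int y 6 < code_to_int r 6)))) := by
  simp [ltK, keyF, pyLtKey]

theorem champ_append (lt : List Int → List Int → Bool) (l : List (List Int)) (x : List Int) :
    champ lt (l ++ [x]) = match champ lt l with
      | none => some x
      | some m => if lt x m then some x else some m := by
  simp [champ, List.foldl_append]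

theorem champ_ne_none (lt : List Int → List Int → Bool) (l : List (List Int)) (h : l ≠ []) :
    ∃ r, champ lt l = some r := by
  induction l using List.reverseRecOn with
  | nil => exact absurd rfl h
  | append_singleton t x ih =>
      rw [champ_append]
      cases ht : champ lt t with
      | none => exact ⟨x, rfl⟩
      | some m => by_cases hx : lt x m = true <;> simp [hx]

theorem champ_spec (lt : List Int → List Int → Bool)
    (htr : ∀ a b c, lt a b = true → lt c b = false → lt a c = true)
    (hasym : ∀ a b, lt a b = true → lt b a = false)
    (l : List (List Int)) (r : List Int) (h : champ lt l = some r) :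
    ∃ l1 l2, l = l1 ++ r :: l2 ∧ (∀ y ∈ l, lt y r = false) ∧ (∀ y ∈ l1, lt r y = true) := by
  have hirr : ∀ a, lt a a = false := by
    intro a; cases ha : lt a a with
    | false => rfl
    | true => exact (Bool.false_ne_true ((hasym a a ha).symm.trans ha)).elim
  induction l using List.reverseRecOn generalizing r with
  | nil => simp [champ] at h
  | append_singleton t x ih =>
      rw [champ_append] at h
      cases ht : champ lt t with
      | none =>
          rw [ht] at h; dsimp only at h
          injection h with h; subst h
          have hte : t = [] := by
            cases t with
            | nil => rfl
            | cons a t' =>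
                obtain ⟨r', hr'⟩ := champ_ne_none lt (a :: t') (by simp)
                rw [hr'] at ht; cases ht
          subst hte
          exact ⟨[], [], rfl, by intro y hy; simp at hy; subst hy; exact hirr _, by simp⟩
      | some m =>
          rw [ht] at h; dsimp only at h
          obtain ⟨t1, t2, he, hmin, hfst⟩ := ih m ht
          by_cases hx : lt x m = true
          · rw [if_pos hx] at h; injection h with h; subst h
            have hfst2 := fun y hy => htr _ m y hx (hmin y hy)
            refine ⟨t, [], by simp, ?_, hfst2⟩
            intro y hy
            rcases List.mem_append.1 hy with hy | hy
            · exact hasym _ y (hfst2 y hy)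
            · simp at hy; subst hy; exact hirr _
          · rw [if_neg hx] at h; injection h with h; subst h
            refine ⟨t1, t2 ++ [x], by simp [he], ?_, hfst⟩
            intro y hy
            rcases List.mem_append.1 hy with hy | hy
            · exact hmin y hy
            · simp at hy; subst hy; simpa using hx

theorem head_insertBy (before : List Int → List Int → Bool) (x : List Int) (ys : List (List Int)) :
    (PySem.List.insertBy before x ys).head? = match ys.head? with
      | none => some x
      | some y => if before x y then some x else some y := by
  cases ys with
  | nil => simp [PySem.List.insertBy]
  | cons y t => by_cases h : before x y = true <;> simp [PySem.List.insertBy, h]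

theorem sorted_append_singleton (l : List (List Int)) (x : List Int) :
    PySem.List.sorted (l ++ [x]) (fun c => code_to_int c 6) =
      PySem.List.insertBy (fun a b => decide (code_to_int a 6 < code_to_int b 6)) x
        (PySem.List.sorted l (fun c => code_to_int c 6)) := by
  rw [PySem.List.sorted_eq_foldl_insertBy, PySem.List.sorted_eq_foldl_insertBy, List.foldl_append]
  rfl

theorem head_sorted_eq_champ (l : List (List Int)) :
    (PySem.List.sorted l (fun c => code_to_int c 6)).head? = champ ltC l := by
  induction l using List.reverseRecOn with
  | nil => simp [PySem.List.sorted, champ]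
  | append_singleton t x ih =>
      rw [sorted_append_singleton, head_insertBy, champ_append, ← ih]
      cases hs : (PySem.List.sorted t (fun c => code_to_int c 6)).head? with
      | none => rfl
      | some y => rfl

theorem A_decomp (S : List (List Int)) (gs : List (List Int)) (h : gs ≠ []) :
    ∃ l1 l2, gs = l1 ++ (minimax_pick S gs) :: l2 ∧
      (∀ y ∈ gs, ltK S y (minimax_pick S gs) = false) ∧
      (∀ y ∈ l1, ltK S (minimax_pick S gs) y = true) := by
  obtain ⟨m, hfold, hmin, g0, hg0, hg0m⟩ := loopW S gs h
  have hpick0 := minimax_pick_eq S gs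
  rw [hfold] at hpick0
  dsimp only at hpick0
  set bg := gs.filter (fun g => decide (wcF S g = m)) with hbg
  set inS := bg.filter (fun g => S.contains g) with hinS
  have hbgne : bg ≠ [] := by
    have : g0 ∈ bg := by rw [hbg]; exact List.mem_filter.2 ⟨hg0, by simp [hg0m]⟩
    intro he; rw [he] at this; simp at this
  by_cases hE : inS.isEmpty
  · -- no best guess lies in S
    have hfinal : minimax_pick S gs =
        (PySem.List.sorted bg (fun c => code_to_int c 6)).headD [] := by
      rw [hpick0, if_pos hE]
    have hnc : ∀ y ∈ bg, S.contains y = false := by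
      intro y hy
      have := List.isEmpty_iff.1 hE
      rw [hinS, List.filter_eq_nil_iff] at this
      simpa using this y hy
    obtain ⟨r, hr⟩ := champ_ne_none ltC bg hbgne
    have hrA : minimax_pick S gs = r := by
      rw [hfinal, List.headD_eq_head?_getD, head_sorted_eq_champ, hr]; rfl
    rw [hrA]
    obtain ⟨f1, f2, hfe, hminC, hfstC⟩ := champ_spec ltC ltC_trans_not ltC_asym bg r hr
    have hsplit : gs.filter (fun g => decide (wcF S g = m)) = f1 ++ (r :: f2) := by
      rw [← hbg, hfe]
    obtain ⟨g1, g2, hgse, hf1, hf2⟩ := List.filter_eq_append_iff.1 hsplit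
    obtain ⟨g21, g22, hg2e, hg21, hpr, hg22⟩ := List.filter_eq_cons_iff.1 hf2
    have hwr : wcF S r = m := by simpa using hpr
    have hrbg : r ∈ bg := by rw [hfe]; simp
    have hcr : S.contains r = false := hnc r hrbg
    have hfr : flagF S r = 1 := flagF_of_not_contains S r hcr
    refine ⟨g1 ++ g21, g22, by rw [hgse, hg2e, List.append_assoc], ?_, ?_⟩
    · intro y hy
      have hym := hmin y hy
      rw [Bool.eq_false_iff, Ne, ltK_true_iff]
      by_cases hyw : wcF S y = m
      · have hybg : y ∈ bg := by rw [hbg]; exact List.mem_filter.2 ⟨hy, by simp [hyw]⟩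
        have hfy : flagF S y = 1 := flagF_of_not_contains S y (hnc y hybg)
        have hyf : ltC y r = false := hminC y hybg
        simp only [ltC, decide_eq_false_iff_not, not_lt] at hyf
        intro hcon
        rcases hcon with h1 | ⟨h1, h2 | ⟨h2, h3⟩⟩ <;> omega
      · intro hcon
        rcases hcon with h1 | ⟨h1, _⟩ <;> omega
    · intro y hy
      rw [ltK_true_iff]
      rcases List.mem_append.1 hy with hy | hy
      · by_cases hyw : wcF S y = m
        · have hyf1 : y ∈ f1 := by
            rw [← hf1]; exact List.mem_filter.2 ⟨hy, by simp [hyw]⟩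
          have hybg : y ∈ bg := by rw [hfe]; exact List.mem_append.2 (Or.inl hyf1)
          have hfy : flagF S y = 1 := flagF_of_not_contains S y (hnc y hybg)
          have := hfstC y hyf1
          simp only [ltC, decide_eq_true_eq] at this
          right; exact ⟨by omega, Or.inr ⟨by omega, this⟩⟩
        · have := hmin y (by rw [hgse]; exact List.mem_append.2 (Or.inl hy))
          left; omega
      · have h21 := hg21 y hy
        have hyw : ¬ wcF S y = m := by simpa using h21
        have := hmin y (by rw [hgse, hg2e]; simp [hy])
        left; omega
  · -- some best guess lies in S
    have hfinal : minimax_pick S gs =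
        (PySem.List.sorted inS (fun c => code_to_int c 6)).headD [] := by
      rw [hpick0, if_neg hE]
    have hinSne : inS ≠ [] := by
      intro he; rw [he] at hE; simp at hE
    have hinS2 : inS = gs.filter (fun g => S.contains g && decide (wcF S g = m)) := by
      rw [hinS, hbg, List.filter_filter]
    obtain ⟨r, hr⟩ := champ_ne_none ltC inS hinSne
    have hrA : minimax_pick S gs = r := by
      rw [hfinal, List.headD_eq_head?_getD, head_sorted_eq_champ, hr]; rfl
    rw [hrA]
    obtain ⟨f1, f2, hfe, hminC, hfstC⟩ := champ_spec ltC ltC_trans_not ltC_asym inS r hr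
    have hsplit : gs.filter (fun g => S.contains g && decide (wcF S g = m)) = f1 ++ (r :: f2) := by
      rw [← hinS2, hfe]
    obtain ⟨g1, g2, hgse, hf1, hf2⟩ := List.filter_eq_append_iff.1 hsplit
    obtain ⟨g21, g22, hg2e, hg21, hpr, hg22⟩ := List.filter_eq_cons_iff.1 hf2
    have hpr' : S.contains r = true ∧ wcF S r = m := by simpa using hpr
    have hcr : S.contains r = true := hpr'.1
    have hwr : wcF S r = m := hpr'.2
    have hfr : flagF S r = 0 := flagF_of_contains S r hcr
    refine ⟨g1 ++ g21, g22, by rw [hgse, hg2e, List.append_assoc], ?_, ?_⟩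
    · intro y hy
      have hym := hmin y hy
      rw [Bool.eq_false_iff, Ne, ltK_true_iff]
      by_cases hyw : wcF S y = m
      · by_cases hyc : S.contains y = true
        · have hyinS : y ∈ inS := by
            rw [hinS2]; exact List.mem_filter.2 ⟨hy, by rw [Bool.and_eq_true]; exact ⟨hyc, by simp [hyw]⟩⟩
          have hfy : flagF S y = 0 := flagF_of_contains S y hyc
          have hyf : ltC y r = false := hminC y hyinS
          simp only [ltC, decide_eq_false_iff_not, not_lt] at hyf
          intro hcon
          rcases hcon with h1 | ⟨h1, h2 | ⟨h2, h3⟩⟩ <;> omega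
        · have hfy : flagF S y = 1 := flagF_of_not_contains S y (Bool.eq_false_iff.mpr hyc)
          intro hcon
          rcases hcon with h1 | ⟨h1, h2 | ⟨h2, h3⟩⟩ <;> omega
      · intro hcon
        rcases hcon with h1 | ⟨h1, _⟩ <;> omega
    · intro y hy
      rw [ltK_true_iff]
      rcases List.mem_append.1 hy with hy | hy
      · by_cases hq : (S.contains y && decide (wcF S y = m)) = true
        · have hyf1 : y ∈ f1 := by
            rw [← hf1]; exact List.mem_filter.2 ⟨hy, hq⟩
          have hyinS : y ∈ inS := by rw [hfe]; exact List.mem_append.2 (Or.inl hyf1)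
          rw [Bool.and_eq_true] at hq
          obtain ⟨hyc, hyw'⟩ := hq
          have hyw : wcF S y = m := by simpa using hyw'
          have hfy : flagF S y = 0 := flagF_of_contains S y hyc
          have := hfstC y hyf1
          simp only [ltC, decide_eq_true_eq] at this
          right; exact ⟨by omega, Or.inr ⟨by omega, this⟩⟩
        · have hym := hmin y (by rw [hgse]; exact List.mem_append.2 (Or.inl hy))
          simp only [Bool.and_eq_true, decide_eq_true_eq, not_and] at hq
          by_cases hyw : wcF S y = m
          · have hyc : ¬ S.contains y = true := fun hc => hq hc hyw
            have hfy : flagF S y = 1 := flagF_of_not_contains S y (Bool.eq_false_iff.mpr hyc)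
            right; exact ⟨by omega, Or.inl (by omega)⟩
          · left; omega
      · have h21 := hg21 y hy
        have hym := hmin y (by rw [hgse, hg2e]; simp [hy])
        simp only [Bool.and_eq_true, decide_eq_true_eq, not_and] at h21
        by_cases hyw : wcF S y = m
        · have hyc : ¬ S.contains y = true := fun hc => h21 hc hyw
          have hfy : flagF S y = 1 := flagF_of_not_contains S y (Bool.eq_false_iff.mpr hyc)
          right; exact ⟨by omega, Or.inl (by omega)⟩
        · left; omega

theorem champ_pair (K : List Int → Int × Int × Int) :
    ∀ (l : List (List Int)) (o : Option (List Int)),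
    l.foldl (fun best guess =>
      match best with
      | none => some (K guess, guess)
      | some (bk, bg) => if pyLtKey (K guess) bk then some (K guess, guess) else some (bk, bg))
      (o.map (fun m => (K m, m)))
    = (l.foldl (fun acc x => match acc with
        | none => some x
        | some m => if pyLtKey (K x) (K m) then some x else some m) o).map (fun m => (K m, m)) := by
  intro l
  induction l with
  | nil => intro o; rfl
  | cons x t ih =>
      intro o
      rw [List.foldl_cons, List.foldl_cons]
      cases o with
      | none => exact ih (some x)
      | some m =>
          show t.foldl _ (if pyLtKey (K x) (K m) then some (K x, x) else some (K m, m)) =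
            (t.foldl _ (if pyLtKey (K x) (K m) then some x else some m)).map _
          by_cases h : pyLtKey (K x) (K m) = true
          · rw [if_pos h, if_pos h]; exact ih (some x)
          · rw [if_neg (by simpa using h), if_neg (by simpa using h)]; exact ih (some m)

theorem foldl_champ_some (lt : List Int → List Int → Bool) :
    ∀ (t : List (List Int)) (m : List Int), ∃ r,
    t.foldl (fun acc x => match acc with
        | none => some x
        | some m => if lt x m then some x else some m) (some m) = some r := by
  intro t
  induction t with
  | nil => exact fun m => ⟨m, rfl⟩
  | cons x t ih =>
      intro m
      rw [List.foldl_cons]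
      by_cases h : lt x m = true
      · simpa [h] using ih x
      · simp only [h]
        simpa using ih m

theorem alt_eq_champ (S : List (List Int)) (gs : List (List Int)) (h : gs ≠ []) :
    minimax_pick_alt S gs = (champ (ltK S) gs).getD [] := by
  have h1 : minimax_pick_alt S gs =
      (match gs.foldl (fun best guess =>
        match best with
        | none => some (keyF S guess, guess)
        | some (bk, bg) => if pyLtKey (keyF S guess) bk then some (keyF S guess, guess) else some (bk, bg))
        ((none : Option (List Int)).map (fun m => (keyF S m, m))) with
      | some (_, g) => g
      | none => []) := rfl
  rw [h1, champ_pair (keyF S) gs none]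
  have h2 : champ (ltK S) gs = gs.foldl (fun acc x => match acc with
        | none => some x
        | some m => if pyLtKey (keyF S x) (keyF S m) then some x else some m) none := rfl
  rw [h2]
  cases gs with
  | nil => exact absurd rfl h
  | cons g t =>
      rw [List.foldl_cons]
      obtain ⟨r, hr⟩ := foldl_champ_some (fun x m => pyLtKey (keyF S x) (keyF S m)) t g
      rw [show (match (none : Option (List Int)) with
          | none => some g
          | some m => if pyLtKey (keyF S g) (keyF S m) then some g else some m) = some g from rfl, hr]
      rfl

theorem first_unique (lt : List Int → List Int → Bool)
    (l1 l2 l1' l2' : List (List Int)) (r r' : List Int)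
    (e : l1 ++ r :: l2 = l1' ++ r' :: l2')
    (hmin : ∀ y ∈ l1 ++ r :: l2, lt y r = false) (hfst : ∀ y ∈ l1, lt r y = true)
    (hmin' : ∀ y ∈ l1 ++ r :: l2, lt y r' = false) (hfst' : ∀ y ∈ l1', lt r' y = true) :
    r = r' := by
  induction l1 generalizing l1' with
  | nil =>
      cases l1' with
      | nil => simpa using congrArg List.head? e
      | cons a t' =>
          exfalso
          have ha : r = a := by simpa using congrArg List.head? e
          subst ha
          have hl2 : l2 = t' ++ r' :: l2' := by simpa using congrArg List.tail e
          have h1 : lt r' r = true := hfst' r (by simp)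
          have h2 : lt r' r = false := hmin r' (by simp [hl2])
          rw [h1] at h2; cases h2
  | cons a t ih =>
      cases l1' with
      | nil =>
          exfalso
          have ha : a = r' := by simpa using congrArg List.head? e
          subst ha
          have h1 : lt r a = true := hfst a (by simp)
          have h2 : lt r a = false := hmin' r (by simp)
          rw [h2] at h1; cases h1
      | cons a' t' =>
          have haa : a = a' := by simpa using congrArg List.head? e
          subst haa
          have e2 : t ++ r :: l2 = t' ++ r' :: l2' := by simpa using congrArg List.tail e
          exact ih t' e2 (fun y hy => hmin y (by simp at hy ⊢; tauto))
            (fun y hy => hfst y (by simp [hy]))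
            (fun y hy => hmin' y (by simp at hy ⊢; tauto))
            (fun y hy => hfst' y (by simp [hy]))

theorem pyLtKey_trans_not (a b c : Int × Int × Int)
    (h1 : pyLtKey a b = true) (h2 : pyLtKey c b = false) : pyLtKey a c = true := by
  simp [pyLtKey] at *; omega

theorem pyLtKey_asym (a b : Int × Int × Int) (h : pyLtKey a b = true) : pyLtKey b a = false := by
  simp [pyLtKey] at *; omega

-- ===== VERDICT (by name: the statement is the Claim_ definition above) =====
theorem minimax_pick_spec : Claim_equal_minimax_pick := by
  intro S gs _ hpre
  unfold Spec_minimax_pick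
  obtain ⟨l1, l2, e, hmin, hfst⟩ := A_decomp S gs hpre
  obtain ⟨r, hc⟩ := champ_ne_none (ltK S) gs hpre
  obtain ⟨m1, m2, e', hmin', hfst'⟩ :=
    champ_spec (ltK S) (fun a b c h1 h2 => pyLtKey_trans_not _ _ _ h1 h2)
      (fun a b h1 => pyLtKey_asym _ _ h1) gs r hc
  have heq : minimax_pick S gs = r := by
    apply first_unique (ltK S) l1 l2 m1 m2 (minimax_pick S gs) r (by rw [← e, e'])
    · rw [← e]; exact hmin
    · exact hfst
    · rw [← e]; exact hmin'
    · exact hfst'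
  rw [heq, alt_eq_champ S gs hpre, hc]
  rfl
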